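-- pv_equiv track=rewrite | github.com/SECCON/SECCON2021_online_CTF | misc/case-insensitive/app/app.py | check_and_upper
-- ===== SOURCE A (Python) =====
-- def check_and_upper(message):
--     if len(message) > 24:
--         return None
--
--     message = message.upper()
--
--     for c in message:
--         c = ord(c)
--         if ord("A") > c or c > ord("Z"):
--             return None
--
--     return message
-- ===== SOURCE B (Python) =====
-- def check_and_upper(message):
--     if len(message) > 24:
--         return None
--     message = message.upper()
--     if set(message).issubset(set("ABCDEFGHIJKLMNOPQRSTUVWXYZ")):
--         return message
--     return None
-- ===== Notes on version B (the rewrite author's own statement) =====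
-- stated objective: alternative
-- what changed: Validation by set algebra instead of a per-character early-exit scan: the distinct characters of the uppercased string are collected into a set and subset-tested against a precomputed alphabet set.
import Mathlib
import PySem

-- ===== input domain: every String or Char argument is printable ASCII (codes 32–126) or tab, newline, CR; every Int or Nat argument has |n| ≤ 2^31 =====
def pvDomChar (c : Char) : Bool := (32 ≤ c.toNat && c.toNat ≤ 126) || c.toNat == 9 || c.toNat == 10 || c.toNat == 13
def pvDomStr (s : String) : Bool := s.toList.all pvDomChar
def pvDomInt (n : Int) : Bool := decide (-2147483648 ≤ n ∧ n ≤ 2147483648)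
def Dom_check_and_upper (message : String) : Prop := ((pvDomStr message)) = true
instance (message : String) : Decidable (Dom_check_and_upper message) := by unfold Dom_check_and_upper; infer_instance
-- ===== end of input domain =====

-- B validates by set algebra (distinct chars subset-tested against an alphabet set) instead of a per-character early-exit scan (objective: alternative).
-- ===== PORT A =====
-- A's for-loop with early 'return None', as structural recursion over the chars
def checkLoopA (u : String) : List Char → Option String
  | [] => some u
  | c :: t => if 'A'.toNat > c.toNat || c.toNat > 'Z'.toNat then none else checkLoopA u t

def check_and_upper (message : String) : Option String :=
  if PySem.Str.len message > 24 then none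
  else
    let m := PySem.Str.upper message
    checkLoopA m m.toList

-- ===== PORT B =====
-- set("ABCDEFGHIJKLMNOPQRSTUVWXYZ")
def alphabetSet : PySem.Set Char := PySem.Set.ofList "ABCDEFGHIJKLMNOPQRSTUVWXYZ".toList

def check_and_upper_alt (message : String) : Option String :=
  if PySem.Str.len message > 24 then none
  else
    let m := PySem.Str.upper message
    if PySem.Set.issubset (PySem.Set.ofList m.toList) alphabetSet then some m else none

-- ===== PRECONDITION & SPEC =====
def Spec_check_and_upper (message : String) (out : Option String) : Prop := out = check_and_upper_alt message
instance (message : String) (out : Option String) : Decidable (Spec_check_and_upper message out) := by unfold Spec_check_and_upper; infer_instance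

-- ===== CLAIM (what is proved, stated in full; the proofs are below) =====
def Claim_equal_check_and_upper : Prop := ∀ (message : String), Dom_check_and_upper message → Spec_check_and_upper message (check_and_upper message)

-- ===== LEMMAS AND PROOFS =====

lemma mem_alphabet_iff (c : Char) : c ∈ alphabetSet ↔ 65 ≤ c.toNat ∧ c.toNat ≤ 90 := by
  have hs : alphabetSet = ['A','B','C','D','E','F','G','H','I','J','K','L','M',
      'N','O','P','Q','R','S','T','U','V','W','X','Y','Z'] := by decide
  rw [hs]
  constructor
  · intro h
    simp only [List.mem_cons, List.not_mem_nil, or_false] at h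
    rcases h with rfl|rfl|rfl|rfl|rfl|rfl|rfl|rfl|rfl|rfl|rfl|rfl|rfl|rfl|rfl|rfl|rfl|rfl|rfl|rfl|rfl|rfl|rfl|rfl|rfl|rfl <;> exact ⟨by decide, by decide⟩
  · rintro ⟨h1, h2⟩
    interval_cases hv : c.toNat <;> (rw [← Char.ofNat_toNat c, hv]; decide)

lemma loopA_ok (u : String) (l : List Char) (h : ∀ x ∈ l, 65 ≤ x.toNat ∧ x.toNat ≤ 90) :
    checkLoopA u l = some u := by
  induction l with
  | nil => rfl
  | cons c t ih =>
    have h1 := (h c (by simp)).1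
    have h2 := (h c (by simp)).2
    have hc : (decide ('A'.toNat > c.toNat) || decide (c.toNat > 'Z'.toNat)) = false := by
      simp only [Bool.or_eq_false_iff, decide_eq_false_iff_not, Nat.not_lt, gt_iff_lt]
      exact ⟨h1, h2⟩
    rw [checkLoopA, hc]
    exact ih (fun x hx => h x (by simp [hx]))

lemma loopA_bad (u : String) (l : List Char) (x : Char) (hx : x ∈ l)
    (hbad : ¬ (65 ≤ x.toNat ∧ x.toNat ≤ 90)) : checkLoopA u l = none := by
  induction l with
  | nil => cases hx
  | cons c t ih =>
    by_cases hc : (decide ('A'.toNat > c.toNat) || decide (c.toNat > 'Z'.toNat)) = true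
    · rw [checkLoopA, hc]; rfl
    · rw [Bool.not_eq_true] at hc
      rw [checkLoopA, hc]
      simp only [Bool.or_eq_false_iff, decide_eq_false_iff_not, Nat.not_lt, gt_iff_lt] at hc
      rcases List.mem_cons.mp hx with rfl | hxt
      · exact absurd ⟨hc.1, hc.2⟩ hbad
      · exact ih hxt

-- ===== VERDICT (by name: the statement is the Claim_ definition above) =====
theorem check_and_upper_spec : Claim_equal_check_and_upper := by
  intro message _
  unfold Spec_check_and_upper check_and_upper check_and_upper_alt
  split
  · rfl
  · show checkLoopA (PySem.Str.upper message) (PySem.Str.upper message).toList =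
      if PySem.Set.issubset (PySem.Set.ofList (PySem.Str.upper message).toList) alphabetSet
      then some (PySem.Str.upper message) else none
    by_cases hall : ∀ x ∈ (PySem.Str.upper message).toList, 65 ≤ x.toNat ∧ x.toNat ≤ 90
    · have hsub : PySem.Set.issubset (PySem.Set.ofList (PySem.Str.upper message).toList)
          alphabetSet = true := by
        rw [PySem.Set.issubset_iff _ _]
        intro x hx
        exact (mem_alphabet_iff x).mpr (hall x ((PySem.Set.mem_ofList _ _).mp hx))
      rw [loopA_ok _ _ hall, hsub, if_pos rfl]
    · push Not at hall
      obtain ⟨x, hx, hbad⟩ := hall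
      have hbad' : ¬ (65 ≤ x.toNat ∧ x.toNat ≤ 90) := fun h => absurd (hbad h.1) (not_lt.mpr h.2)
      have hsub : PySem.Set.issubset (PySem.Set.ofList (PySem.Str.upper message).toList)
          alphabetSet = false := by
        rw [Bool.eq_false_iff]
        intro hc
        exact hbad' ((mem_alphabet_iff x).mp
          ((PySem.Set.issubset_iff _ _).mp hc x ((PySem.Set.mem_ofList _ _).mpr hx)))
      rw [loopA_bad _ _ x hx hbad', hsub, if_neg (by simp)]
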